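-- pv_equiv track=rewrite | github.com/phucdev/TL_Bio_RE | tlbiore/data/utils.py | split_sentence
-- ===== SOURCE A (Python) =====
-- from typing import List, Tuple
--
-- START = 1
--
-- END = 2
--
-- def split_sentence(span_list, sentence, include_entities=False) -> List[str]:
--     """
--     :param
--     span_list: List of spans for each entity.
--     sentence: Sentence string that will be split.
--     include_entities : Whether or not to include the entities in the output array.
--
--     :returns
--     Array of sentence blocks that are not to be replaced.
--     We currently divide the sentence into blocks based on the entity spans.
--     For example:
--         "Cytokines measurements during IFN-alpha treatment showed a trend to
--         decreasing levels of IL-4 at 4, 12, and 24 weeks."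
--     with entities "IFN-alpha" and "IL-4" would return for include_entities=False:
--         ["Cytokines measurements during ", " treatment showed a trend to decreasing levels of ",
--         " at 4, 12, and 24 weeks."]
--     and for include_entities=True:
--         ["Cytokines measurements during ", "IFN-alpha", " treatment showed a trend to decreasing levels of ",
--         "IL-4", " at 4, 12, and 24 weeks."]
--
--     {"pair_id":"AIMed.d3.s30.p0","sentence":"Temporally following this growth arrest, the cells develop a
--     senescence morphology and express @PROTEIN$e-associated beta-galactosidase (SA-beta-gal).",
--     "e1_span":[[95,104]],"e2_span":[[95,104]]}
--     """
--     sentence_array: List[str] = []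
--
--     start_idx = 0
--     for triple in span_list:
--         sentence_array.append(sentence[start_idx:triple[START]])
--         if include_entities:
--             sentence_array.append(sentence[triple[START]:triple[END]])
--         start_idx = triple[END]
--     sentence_array.append(sentence[span_list[-1][END]:])
--     return sentence_array
-- ===== SOURCE B (Python) =====
-- def split_sentence(span_list, sentence, include_entities=False):
--     # Build the boundary table once, then slice it with one table-driven pass.
--     bounds = [0]
--     for triple in span_list:
--         bounds.append(triple[1])
--         bounds.append(triple[2])
--     if include_entities:
--         slices = [sentence[bounds[i]:bounds[i + 1]] for i in range(len(bounds) - 1)]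
--     else:
--         slices = [sentence[bounds[2 * i]:bounds[2 * i + 1]] for i in range(len(bounds) // 2)]
--     slices.append(sentence[span_list[-1][2]:])
--     return slices
-- ===== Notes on version B (the rewrite author's own statement) =====
-- stated objective: alternative
-- what changed: Replaces A's single accumulator loop carrying start_idx with a two-phase table-driven pass: first collect all boundary indices into a flat list, then emit slices by indexing that table (consecutive pairs when entities are included, stride-2 pairs otherwise).
import Mathlib
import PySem

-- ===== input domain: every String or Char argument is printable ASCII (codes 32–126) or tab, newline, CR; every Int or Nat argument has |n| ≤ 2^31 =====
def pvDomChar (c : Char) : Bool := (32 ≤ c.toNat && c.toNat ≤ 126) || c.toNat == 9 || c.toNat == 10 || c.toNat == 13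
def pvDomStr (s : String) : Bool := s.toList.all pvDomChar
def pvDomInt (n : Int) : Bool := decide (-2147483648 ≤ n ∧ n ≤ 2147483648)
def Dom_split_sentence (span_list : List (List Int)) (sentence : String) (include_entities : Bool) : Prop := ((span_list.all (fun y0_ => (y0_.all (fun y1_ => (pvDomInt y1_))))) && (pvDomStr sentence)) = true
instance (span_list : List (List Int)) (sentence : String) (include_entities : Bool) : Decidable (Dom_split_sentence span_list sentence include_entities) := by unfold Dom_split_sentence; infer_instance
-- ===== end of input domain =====

-- B replaces A's accumulator loop by a boundary-index table plus a table-driven slicing pass; same cost, different decomposition.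

-- ===== PORT A =====
def split_sentence (span_list : List (List Int)) (sentence : String) (include_entities : Bool) : List String :=
  let st := span_list.foldl (fun (st : List String × Int) triple =>
    let t1 := (PySem.List.pyGet? triple 1).getD 0
    let t2 := (PySem.List.pyGet? triple 2).getD 0
    let arr := st.1 ++ [PySem.Str.slice sentence (some st.2) (some t1)]
    let arr := if include_entities then arr ++ [PySem.Str.slice sentence (some t1) (some t2)] else arr
    (arr, t2)) ([], (0 : Int))
  st.1 ++ [PySem.Str.slice sentence (some ((PySem.List.pyGet? ((PySem.List.pyGet? span_list (-1)).getD []) 2).getD 0)) none]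

-- ===== PORT B =====
def split_sentence_alt (span_list : List (List Int)) (sentence : String) (include_entities : Bool) : List String :=
  let bounds := span_list.foldl (fun bs triple =>
    bs ++ [(PySem.List.pyGet? triple 1).getD 0, (PySem.List.pyGet? triple 2).getD 0]) [(0 : Int)]
  let slices :=
    if include_entities then
      (List.range (bounds.length - 1)).map (fun i =>
        PySem.Str.slice sentence (some (bounds.getD i 0)) (some (bounds.getD (i + 1) 0)))
    else
      (List.range (bounds.length / 2)).map (fun i =>
        PySem.Str.slice sentence (some (bounds.getD (2 * i) 0)) (some (bounds.getD (2 * i + 1) 0)))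
  slices ++ [PySem.Str.slice sentence (some ((PySem.List.pyGet? ((PySem.List.pyGet? span_list (-1)).getD []) 2).getD 0)) none]

-- ===== PRECONDITION & SPEC =====
-- Pre_ excludes exactly the inputs on which A raises IndexError: an empty span_list
-- (span_list[-1]) or a span triple shorter than 3 (triple[1]/triple[2]).
def Pre_split_sentence (span_list : List (List Int)) (sentence : String) (include_entities : Bool) : Prop :=
  span_list ≠ [] ∧ ∀ t ∈ span_list, 3 ≤ t.length
instance (span_list : List (List Int)) (sentence : String) (include_entities : Bool) : Decidable (Pre_split_sentence span_list sentence include_entities) := by unfold Pre_split_sentence; infer_instance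

def pvWitness_split_sentence : List (List Int) × String × Bool := ([[0, 1, 2]], "abcd", true)

def Spec_split_sentence (span_list : List (List Int)) (sentence : String) (include_entities : Bool) (out : List String) : Prop := out = split_sentence_alt span_list sentence include_entities
instance (span_list : List (List Int)) (sentence : String) (include_entities : Bool) (out : List String) : Decidable (Spec_split_sentence span_list sentence include_entities out) := by unfold Spec_split_sentence; infer_instance

-- ===== CLAIM (what is proved, stated in full; the proofs are below) =====
def Claim_equal_split_sentence : Prop := ∀ (span_list : List (List Int)) (sentence : String) (include_entities : Bool), Dom_split_sentence span_list sentence include_entities → Pre_split_sentence span_list sentence include_entities → Spec_split_sentence span_list sentence include_entities (split_sentence span_list sentence include_entities)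

-- ===== LEMMAS AND PROOFS =====

-- common abbreviations for the span boundary reads
def pvG1 (t : List Int) : Int := (PySem.List.pyGet? t 1).getD 0
def pvG2 (t : List Int) : Int := (PySem.List.pyGet? t 2).getD 0

-- reference shape of the segment list A produces, starting from start index s0
def pvSegs (incl : Bool) (f : Int → Int → String) (s0 : Int) : List (List Int) → List String
  | [] => []
  | t :: ts => f s0 (pvG1 t) :: ((if incl then [f (pvG1 t) (pvG2 t)] else []) ++ pvSegs incl f (pvG2 t) ts)

-- consecutive pairs of a list
def pvAdj (f : Int → Int → String) : List Int → List String
  | a :: b :: r => f a b :: pvAdj f (b :: r)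
  | _ => []

-- stride-2 pairs of a list
def pvStride (f : Int → Int → String) : List Int → List String
  | a :: b :: r => f a b :: pvStride f r
  | _ => []

theorem pvA_foldl (incl : Bool) (f : Int → Int → String)
    (ts : List (List Int)) (p : List String × Int) :
    (ts.foldl (fun (st : List String × Int) triple =>
      let t1 := (PySem.List.pyGet? triple 1).getD 0
      let t2 := (PySem.List.pyGet? triple 2).getD 0
      let arr := st.1 ++ [f st.2 t1]
      let arr := if incl then arr ++ [f t1 t2] else arr
      (arr, t2)) p).1 = p.1 ++ pvSegs incl f p.2 ts := by
  induction ts generalizing p with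
  | nil => simp [pvSegs]
  | cons t ts ih =>
    rw [List.foldl_cons, ih]
    cases incl <;> simp [pvSegs, pvG1, pvG2]

theorem pvRange_adj (f : Int → Int → String) (bs : List Int) :
    (List.range (bs.length - 1)).map (fun i => f (bs.getD i 0) (bs.getD (i + 1) 0)) = pvAdj f bs := by
  induction bs using pvAdj.induct with
  | case1 a b r ih =>
    have hlen : (a :: b :: r).length - 1 = (b :: r).length - 1 + 1 := by simp
    rw [hlen, List.range_succ_eq_map, List.map_cons, List.map_map]
    have hmap : List.map ((fun i => f ((a :: b :: r).getD i 0) ((a :: b :: r).getD (i + 1) 0)) ∘ Nat.succ)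
        (List.range ((b :: r).length - 1)) =
        List.map (fun i => f ((b :: r).getD i 0) ((b :: r).getD (i + 1) 0)) (List.range ((b :: r).length - 1)) := by
      apply List.map_congr_left; intro i _
      simp [Function.comp, Nat.succ_eq_add_one]
    rw [hmap, ih]; simp [pvAdj]
  | case2 bs h =>
    rcases bs with _ | ⟨a, _ | ⟨b, r⟩⟩
    · simp [pvAdj]
    · simp [pvAdj]
    · exact (h a b r rfl).elim

theorem pvRange_stride (f : Int → Int → String) (bs : List Int) :
    (List.range (bs.length / 2)).map (fun i => f (bs.getD (2 * i) 0) (bs.getD (2 * i + 1) 0)) = pvStride f bs := by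
  induction bs using pvStride.induct with
  | case1 a b r ih =>
    have hlen : (a :: b :: r).length / 2 = r.length / 2 + 1 := by simp; omega
    rw [hlen, List.range_succ_eq_map, List.map_cons, List.map_map]
    have hmap : List.map ((fun i => f ((a :: b :: r).getD (2 * i) 0) ((a :: b :: r).getD (2 * i + 1) 0)) ∘ Nat.succ)
        (List.range (r.length / 2)) =
        List.map (fun i => f (r.getD (2 * i) 0) (r.getD (2 * i + 1) 0)) (List.range (r.length / 2)) := by
      apply List.map_congr_left; intro i _
      have h2 : 2 * Nat.succ i = 2 * i + 1 + 1 := by omega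
      simp [Function.comp, h2]
    rw [hmap, ih]; simp [pvStride]
  | case2 bs h =>
    rcases bs with _ | ⟨a, _ | ⟨b, r⟩⟩
    · simp [pvStride]
    · simp [pvStride]
    · exact (h a b r rfl).elim

theorem pvAdj_segs (f : Int → Int → String) (ts : List (List Int)) (s0 : Int) :
    pvAdj f (s0 :: ts.flatMap (fun t => [pvG1 t, pvG2 t])) = pvSegs true f s0 ts := by
  induction ts generalizing s0 with
  | nil => simp [pvAdj, pvSegs]
  | cons t ts ih => simp [pvAdj, pvSegs, ih]

theorem pvStride_segs (f : Int → Int → String) (ts : List (List Int)) (s0 : Int) :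
    pvStride f (s0 :: ts.flatMap (fun t => [pvG1 t, pvG2 t])) = pvSegs false f s0 ts := by
  induction ts generalizing s0 with
  | nil => simp [pvStride, pvSegs]
  | cons t ts ih =>
    cases h : ts.flatMap (fun t => [pvG1 t, pvG2 t]) <;>
      simp_all [pvStride, pvSegs, ← ih]

theorem pvBounds_flatMap (ts : List (List Int)) :
    ts.foldl (fun bs triple =>
      bs ++ [(PySem.List.pyGet? triple 1).getD 0, (PySem.List.pyGet? triple 2).getD 0]) [(0 : Int)] =
    (0 : Int) :: ts.flatMap (fun t => [pvG1 t, pvG2 t]) := by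
  rw [PySem.List.foldl_append_eq_flatMap]
  simp [pvG1, pvG2]

-- ===== VERDICT (by name: the statement is the Claim_ definition above) =====
theorem split_sentence_spec : Claim_equal_split_sentence := by
  intro span_list sentence include_entities _ _
  unfold Spec_split_sentence
  simp only [split_sentence, split_sentence_alt]
  rw [pvBounds_flatMap]
  cases include_entities with
  | false =>
    rw [pvA_foldl false (fun a b => PySem.Str.slice sentence (some a) (some b)),
      pvRange_stride (fun a b => PySem.Str.slice sentence (some a) (some b)),
      pvStride_segs]
    simp
  | true =>
    rw [pvA_foldl true (fun a b => PySem.Str.slice sentence (some a) (some b)),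
      pvRange_adj (fun a b => PySem.Str.slice sentence (some a) (some b)),
      pvAdj_segs]
    simp
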